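-- pv_equiv track=rewrite | github.com/nachokhan/travel_together | metodo2.py | distribuir_personas_en_vehiculos
-- ===== SOURCE A (Python) =====
-- def distribuir_personas_en_vehiculos(M, capacidades_vehiculos):
--     # Verificar que haya suficiente capacidad total en los vehículos
--     capacidad_total = sum(capacidades_vehiculos)
--     if capacidad_total < M:
--         raise ValueError("La capacidad total de los vehículos no es suficiente para alojar a todas las personas.")
--
--     # Calcular la cantidad máxima de personas que se pueden asignar equitativamente a cada vehículo
--     max_personas_equitativas = M // len(capacidades_vehiculos)
--
--     # Inicializar la lista que contendrá la cantidad de personas asignadas a cada vehículo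
--     asignaciones_vehiculos = [max_personas_equitativas] * len(capacidades_vehiculos)
--
--     # Calcular el número restante de personas por asignar
--     personas_restantes = M % len(capacidades_vehiculos)
--
--     # Distribuir las personas restantes de manera equitativa entre los vehículos
--     for i in range(personas_restantes):
--         asignaciones_vehiculos[i] += 1
--
--     return asignaciones_vehiculos
-- ===== SOURCE B (Python) =====
-- def distribuir_personas_en_vehiculos(M, capacidades_vehiculos):
--     # Verificar que haya suficiente capacidad total en los vehículos
--     if sum(capacidades_vehiculos) < M:
--         raise ValueError("La capacidad total de los vehículos no es suficiente para alojar a todas las personas.")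
--
--     # Single greedy pass: each vehicle takes the ceiling of the remaining
--     # people over the remaining vehicles, which puts the extras first.
--     asignaciones = []
--     restantes = M
--     vehiculos_restantes = len(capacidades_vehiculos)
--     for _ in capacidades_vehiculos:
--         share = (restantes + vehiculos_restantes - 1) // vehiculos_restantes
--         asignaciones.append(share)
--         restantes -= share
--         vehiculos_restantes -= 1
--     return asignaciones
-- ===== Notes on version B (the rewrite author's own statement) =====
-- stated objective: alternative
-- what changed: Replaces A's quotient/remainder formula plus a second fix-up loop over the first M%n slots by a single greedy pass that gives each vehicle the ceiling of remaining people over remaining vehicles.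
import Mathlib
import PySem

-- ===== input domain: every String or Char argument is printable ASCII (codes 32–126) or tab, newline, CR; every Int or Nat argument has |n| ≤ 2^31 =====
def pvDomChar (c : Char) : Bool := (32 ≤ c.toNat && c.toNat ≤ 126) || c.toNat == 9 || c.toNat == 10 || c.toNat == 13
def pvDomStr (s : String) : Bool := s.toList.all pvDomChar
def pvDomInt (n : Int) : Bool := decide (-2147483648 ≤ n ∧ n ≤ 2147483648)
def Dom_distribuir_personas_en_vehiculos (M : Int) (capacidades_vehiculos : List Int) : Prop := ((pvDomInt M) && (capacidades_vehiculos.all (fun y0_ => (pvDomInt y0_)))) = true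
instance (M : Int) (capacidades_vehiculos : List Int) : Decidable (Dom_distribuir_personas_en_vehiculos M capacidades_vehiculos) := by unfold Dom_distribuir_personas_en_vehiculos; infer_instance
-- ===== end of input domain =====

-- B replaces A's quotient/remainder + fix-up loop by one greedy ceiling pass (same cost, different decomposition).


-- ===== PORT A =====
-- Literal port of A past the two raise points (ValueError / ZeroDivisionError), excluded by Pre_.
def distribuir_personas_en_vehiculos (M : Int) (capacidades_vehiculos : List Int) : List Int :=
  let max_personas_equitativas : Int := PySem.Int.floordiv M (capacidades_vehiculos.length : Int)
  let asignaciones_vehiculos : List Int := List.replicate capacidades_vehiculos.length max_personas_equitativas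
  let personas_restantes : Int := PySem.Int.mod M (capacidades_vehiculos.length : Int)
  (PySem.List.pyRange 0 personas_restantes 1).foldl
    (fun a i => PySem.List.pySetD a i (PySem.List.pyGetD a i 0 + 1)) asignaciones_vehiculos

-- ===== PORT B =====
-- B's loop over the vehicles with state (restantes, vehiculos_restantes), building the list front-first.
def pvGoB : List Int → Int → Int → List Int
  | [], _, _ => []
  | _ :: t, restantes, vehiculos_restantes =>
    let share := PySem.Int.floordiv (restantes + vehiculos_restantes - 1) vehiculos_restantes
    share :: pvGoB t (restantes - share) (vehiculos_restantes - 1)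

def distribuir_personas_en_vehiculos_alt (M : Int) (capacidades_vehiculos : List Int) : List Int :=
  pvGoB capacidades_vehiculos M (capacidades_vehiculos.length : Int)

-- ===== PRECONDITION & SPEC =====
-- Pre_ excludes exactly the inputs where A raises: total capacity below M (ValueError, B raises too)
-- and the empty vehicle list (ZeroDivisionError from M // 0; B's greedy loop would return [] there when M ≤ 0).
def Pre_distribuir_personas_en_vehiculos (M : Int) (capacidades_vehiculos : List Int) : Prop :=
  M ≤ capacidades_vehiculos.sum ∧ capacidades_vehiculos ≠ []
instance (M : Int) (capacidades_vehiculos : List Int) : Decidable (Pre_distribuir_personas_en_vehiculos M capacidades_vehiculos) := by unfold Pre_distribuir_personas_en_vehiculos; infer_instance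
def pvWitness_distribuir_personas_en_vehiculos : Int × List Int := (3, [2, 2, 2])

def Spec_distribuir_personas_en_vehiculos (M : Int) (capacidades_vehiculos : List Int) (out : List Int) : Prop := out = distribuir_personas_en_vehiculos_alt M capacidades_vehiculos
instance (M : Int) (capacidades_vehiculos : List Int) (out : List Int) : Decidable (Spec_distribuir_personas_en_vehiculos M capacidades_vehiculos out) := by unfold Spec_distribuir_personas_en_vehiculos; infer_instance

-- ===== CLAIM (what is proved, stated in full; the proofs are below) =====
def Claim_equal_distribuir_personas_en_vehiculos : Prop := ∀ (M : Int) (capacidades_vehiculos : List Int), Dom_distribuir_personas_en_vehiculos M capacidades_vehiculos → Pre_distribuir_personas_en_vehiculos M capacidades_vehiculos → Spec_distribuir_personas_en_vehiculos M capacidades_vehiculos (distribuir_personas_en_vehiculos M capacidades_vehiculos)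
-- ===== LEMMAS AND PROOFS =====

-- floor division of a*n + b by n, with 0 ≤ b < n, is a
theorem pv_fdiv_mul_add (a b n : Int) (h0 : 0 ≤ b) (h1 : b < n) :
    PySem.Int.floordiv (a * n + b) n = a := by
  have hn : 0 < n := lt_of_le_of_lt h0 h1
  rw [PySem.Int.floordiv_eq_iff_of_pos hn]
  have he : (a + 1) * n = a * n + n := by ring
  exact ⟨by linarith, by rw [he]; linarith⟩

-- B's greedy pass on a load of q per vehicle plus r extras
theorem pvGoB_closed (caps : List Int) (q : Int) (r : Int) (h0 : 0 ≤ r)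
    (h1 : r.toNat ≤ caps.length) :
    pvGoB caps (q * (caps.length : Int) + r) (caps.length : Int)
      = List.replicate r.toNat (q + 1) ++ List.replicate (caps.length - r.toNat) q := by
  induction caps generalizing q r with
  | nil =>
    simp only [List.length_nil] at h1
    have hr : r = 0 := by omega
    subst hr
    simp [pvGoB]
  | cons hd t ih =>
    simp only [pvGoB, List.length_cons]
    simp only [List.length_cons] at h1
    have hlen : ((t.length + 1 : Nat) : Int) = (t.length : Int) + 1 := by push_cast; ring
    by_cases hr : 0 < r
    · have hb0 : (0:Int) ≤ r - 1 := by omega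
      have hb1 : r - 1 < (t.length : Int) + 1 := by omega
      have hs : PySem.Int.floordiv (q * ((t.length + 1 : Nat) : Int) + r + ((t.length + 1 : Nat) : Int) - 1) ((t.length + 1 : Nat) : Int) = q + 1 := by
        rw [hlen]
        have harr : q * ((t.length : Int) + 1) + r + ((t.length : Int) + 1) - 1
             = (q + 1) * ((t.length : Int) + 1) + (r - 1) := by ring
        rw [harr]
        exact pv_fdiv_mul_add _ _ _ hb0 hb1
      rw [hs]
      have harg : q * ((t.length + 1 : Nat) : Int) + r - (q + 1)
                = q * (t.length : Int) + (r - 1) := by rw [hlen]; ring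
      have harg2 : ((t.length + 1 : Nat) : Int) - 1 = (t.length : Int) := by rw [hlen]; ring
      rw [harg, harg2, ih q (r - 1) hb0 (by omega)]
      have hrt : r.toNat = (r - 1).toNat + 1 := by omega
      rw [hrt]
      have hlt : t.length + 1 - ((r - 1).toNat + 1) = t.length - (r - 1).toNat := by omega
      rw [hlt, List.replicate_succ]
      simp
    · have hr0 : r = 0 := by omega
      subst hr0
      have hs : PySem.Int.floordiv (q * ((t.length + 1 : Nat) : Int) + 0 + ((t.length + 1 : Nat) : Int) - 1) ((t.length + 1 : Nat) : Int) = q := by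
        rw [hlen]
        have harr : q * ((t.length : Int) + 1) + 0 + ((t.length : Int) + 1) - 1
             = q * ((t.length : Int) + 1) + (t.length : Int) := by ring
        rw [harr]
        exact pv_fdiv_mul_add _ _ _ (Int.natCast_nonneg _) (by omega)
      rw [hs]
      have harg : q * ((t.length + 1 : Nat) : Int) + 0 - q = q * (t.length : Int) + 0 := by rw [hlen]; ring
      have harg2 : ((t.length + 1 : Nat) : Int) - 1 = (t.length : Int) := by rw [hlen]; ring
      rw [harg, harg2, ih q 0 le_rfl (by omega)]
      simp [List.replicate_succ]

-- A's fix-up loop on the replicated base list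
theorem pvA_loop_closed (n : Nat) (q : Int) (r : Nat) (h : r ≤ n) :
    (PySem.List.pyRange 0 (r : Int) 1).foldl
        (fun a i => PySem.List.pySetD a i (PySem.List.pyGetD a i 0 + 1)) (List.replicate n q)
      = List.replicate r (q + 1) ++ List.replicate (n - r) q := by
  induction r with
  | zero => simp [PySem.List.pyRange_one_eq_nil]
  | succ r ih =>
    have hle : r ≤ n := Nat.le_of_succ_le h
    have hcast : ((r + 1 : Nat) : Int) = (r : Int) + 1 := by push_cast; ring
    rw [hcast, PySem.List.pyRange_one_succ_right (Int.natCast_nonneg r), List.foldl_append, ih hle]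
    simp only [List.foldl_cons, List.foldl_nil]
    rw [PySem.List.pyGetD_of_nonneg _ _ (Int.natCast_nonneg r), PySem.List.pySetD_natCast]
    simp only [Int.toNat_natCast]
    have hnr : 0 < n - r := by omega
    have hget : (List.replicate r (q + 1) ++ List.replicate (n - r) q).getD r 0 = q := by
      rw [List.getD_eq_getElem?_getD, List.getElem?_append_right (by simp)]
      simp [hnr]
    rw [hget, List.set_append]
    simp only [List.length_replicate, lt_irrefl, if_false, Nat.sub_self]
    have h1 : n - r = (n - (r + 1)) + 1 := by omega
    rw [h1, List.replicate_succ, List.set_cons_zero, List.replicate_succ']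
    simp [List.append_assoc]

-- ===== VERDICT (by name: the statement is the Claim_ definition above) =====
theorem distribuir_personas_en_vehiculos_spec : Claim_equal_distribuir_personas_en_vehiculos := by
  intro M caps _ hpre
  obtain ⟨_, hne⟩ := hpre
  have hn : 0 < caps.length := List.length_pos_iff.mpr hne
  have hnI : (0 : Int) < (caps.length : Int) := by exact_mod_cast hn
  unfold Spec_distribuir_personas_en_vehiculos
  simp only [distribuir_personas_en_vehiculos, distribuir_personas_en_vehiculos_alt]
  set q := PySem.Int.floordiv M (caps.length : Int) with hqdef
  set r := PySem.Int.mod M (caps.length : Int) with hrdef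
  have hq := PySem.Int.floordiv_mul_add_mod M (caps.length : Int)
  have hr0 : 0 ≤ r := by
    rw [hrdef, PySem.Int.mod_eq_emod_of_pos hnI]
    exact Int.emod_nonneg M (ne_of_gt hnI)
  have hr1 : r < (caps.length : Int) := by
    rw [hrdef, PySem.Int.mod_eq_emod_of_pos hnI]
    exact Int.emod_lt_of_pos M hnI
  have hM : M = q * (caps.length : Int) + r := by
    rw [hqdef, hrdef]; linarith [hq]
  have hrn : r = ((r.toNat : Nat) : Int) := (Int.toNat_of_nonneg hr0).symm
  have hle : r.toNat ≤ caps.length := by omega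
  calc (PySem.List.pyRange 0 r 1).foldl
        (fun a i => PySem.List.pySetD a i (PySem.List.pyGetD a i 0 + 1))
        (List.replicate caps.length q)
      = List.replicate r.toNat (q + 1) ++ List.replicate (caps.length - r.toNat) q := by
        rw [hrn]; exact pvA_loop_closed caps.length q r.toNat (by omega)
    _ = pvGoB caps (q * (caps.length : Int) + r) (caps.length : Int) :=
        (pvGoB_closed caps q r hr0 hle).symm
    _ = pvGoB caps M (caps.length : Int) := by rw [← hM]
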